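-- pv_equiv track=rewrite | github.com/JenCW/brandedflow | systems/automation-engine/daily_summary.py | _strip_junk
-- ===== SOURCE A (Python) =====
-- _UI_JUNK = ("skip to content", "open sidebar", "chatgpt", "copy", "share", "new chat")
--
-- def _strip_junk(text: str) -> str:
--     out = []
--     in_code = False
--     for line in text.split("\n"):
--         s = line.strip()
--         low = s.lower()
--
--         if "```" in low:
--             in_code = not in_code
--             continue
--         if in_code:
--             continue
--
--         if not s:
--             continue
--         if low.startswith(_UI_JUNK):
--             continue
--         out.append(s)
--     return "\n".join(out)
-- ===== SOURCE B (Python) =====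
-- _UI_JUNK = ("skip to content", "open sidebar", "chatgpt", "copy", "share", "new chat")
--
-- def _strip_junk(text: str) -> str:
--     # Partition the lines into segments separated by fence lines (lines
--     # containing ```), which are discarded.  Even-indexed segments are the
--     # text outside code blocks; odd-indexed ones are inside and are dropped.
--     segments = []
--     current = []
--     for line in text.split("\n"):
--         if "```" in line:
--             segments.append(current)
--             current = []
--         else:
--             current.append(line)
--     segments.append(current)
--
--     kept = []
--     for i, seg in enumerate(segments):
--         if i % 2 == 0:
--             for line in seg:
--                 s = line.strip()
--                 if s and not s.lower().startswith(_UI_JUNK):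
--                     kept.append(s)
--     return "\n".join(kept)
-- ===== Notes on version B (the rewrite author's own statement) =====
-- stated objective: alternative
-- what changed: Instead of a per-line in_code boolean toggle, B partitions the line list into segments at ``` fence lines, keeps only the even-indexed (outside-code) segments, and then applies the same per-line strip/junk filter.
import Mathlib
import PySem

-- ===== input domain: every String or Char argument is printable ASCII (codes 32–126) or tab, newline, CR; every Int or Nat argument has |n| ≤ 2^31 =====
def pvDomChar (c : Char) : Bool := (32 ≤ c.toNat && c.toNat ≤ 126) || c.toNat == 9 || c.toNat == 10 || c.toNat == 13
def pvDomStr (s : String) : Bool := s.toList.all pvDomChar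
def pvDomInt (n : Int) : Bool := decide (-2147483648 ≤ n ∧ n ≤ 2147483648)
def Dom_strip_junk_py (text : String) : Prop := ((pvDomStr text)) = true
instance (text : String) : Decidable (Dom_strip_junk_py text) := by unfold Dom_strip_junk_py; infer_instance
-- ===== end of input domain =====

-- B replaces A's line-by-line in_code flag by partitioning the lines at ``` fence lines and
-- keeping only the even-indexed segments (objective: alternative decomposition, same cost).

-- ===== PORT A =====
def pvJunk : List String := ["skip to content", "open sidebar", "chatgpt", "copy", "share", "new chat"]

def strip_junk_py (text : String) : String :=
  let lines := (PySem.Str.split? text "\n").getD []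
  let st := lines.foldl (fun (acc : List String × Bool) line =>
    let s := PySem.Str.strip line
    let low := PySem.Str.lower s
    if PySem.Str.isIn "```" low then (acc.1, !acc.2)
    else if acc.2 then acc
    else if s = "" then acc
    else if pvJunk.any (fun p => PySem.Str.startswith low p) then acc
    else (acc.1 ++ [s], acc.2)) ([], false)
  PySem.Str.join "\n" st.1

-- ===== PORT B =====
def strip_junk_py_alt (text : String) : String :=
  let lines := (PySem.Str.split? text "\n").getD []
  let part := lines.foldl (fun (acc : List (List String) × List String) line =>
    if PySem.Str.isIn "```" line then (acc.1 ++ [acc.2], ([] : List String))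
    else (acc.1, acc.2 ++ [line])) ([], [])
  let segments := part.1 ++ [part.2]
  let kept := (PySem.List.enumerate segments).foldl (fun (acc : List String) p =>
    if PySem.Int.mod p.1 2 == 0 then
      p.2.foldl (fun (acc2 : List String) line =>
        let s := PySem.Str.strip line
        if (s != "") && !(pvJunk.any (fun pre => PySem.Str.startswith (PySem.Str.lower s) pre))
        then acc2 ++ [s] else acc2) acc
    else acc) []
  PySem.Str.join "\n" kept

-- ===== PRECONDITION & SPEC =====
def Spec_strip_junk_py (text : String) (out : String) : Prop := out = strip_junk_py_alt text
instance (text : String) (out : String) : Decidable (Spec_strip_junk_py text out) := by unfold Spec_strip_junk_py; infer_instance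

-- ===== CLAIM (what is proved, stated in full; the proofs are below) =====
def Claim_equal_strip_junk_py : Prop := ∀ (text : String), Dom_strip_junk_py text → Spec_strip_junk_py text (strip_junk_py text)

-- ===== LEMMAS AND PROOFS =====

-- per-line processing shared by both programs: the (0- or 1-element) list of kept output lines
def pvKeep (l : String) : List String :=
  let s := PySem.Str.strip l
  if s = "" then []
  else if pvJunk.any (fun p => PySem.Str.startswith (PySem.Str.lower s) p) then []
  else [s]

-- the lines A keeps from `ls` starting with in_code state `c`
def pvAux : List String → Bool → List String
  | [], _ => []
  | l :: ls, c =>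
    if PySem.Str.isIn "```" l then pvAux ls (!c)
    else if c then pvAux ls c
    else pvKeep l ++ pvAux ls c

-- B's partition of `ls` at fence lines, with `cur` the segment under construction
def pvPart : List String → List String → List (List String) × List String
  | [], cur => ([], cur)
  | l :: ls, cur =>
    if PySem.Str.isIn "```" l then (cur :: (pvPart ls []).1, (pvPart ls []).2)
    else pvPart ls (cur ++ [l])

-- the lines B keeps from segments `sgs`, `c` = current segment has odd index (is code)
def pvKept : List (List String) → Bool → List String
  | [], _ => []
  | sg :: sgs, c => (if c then [] else sg.flatMap pvKeep) ++ pvKept sgs (!c)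

theorem pv_lowerChar_backtick {c : Char} (h : PySem.Chars.lowerChar c = Char.ofNat 96) :
    c = Char.ofNat 96 := by
  unfold PySem.Chars.lowerChar at h
  split at h
  · exfalso
    rename_i hu
    simp only [PySem.Chars.isupper, Bool.and_eq_true, decide_eq_true_eq, Char.le_def,
      UInt32.le_iff_toNat_le] at hu
    have hA : ('A').val.toNat = 65 := rfl
    have hZ : ('Z').val.toNat = 90 := rfl
    have h1 := hu.1; have h2 := hu.2
    rw [hA] at h1; rw [hZ] at h2
    have hlo2 : 65 ≤ c.toNat := h1
    have hhi2 : c.toNat ≤ 90 := h2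
    have hv : (c.toNat + 32).isValidChar := by left; omega
    have h96 : (96 : Nat).isValidChar := by left; omega
    have := congrArg Char.toNat h
    rw [Char.toNat_ofNat, Char.toNat_ofNat] at this
    simp [hv, h96] at this
    omega
  · exact h

theorem pv_backtick_infix_map (cs : List Char) :
    ([Char.ofNat 96, Char.ofNat 96, Char.ofNat 96] <:+: cs.map PySem.Chars.lowerChar) ↔
      [Char.ofNat 96, Char.ofNat 96, Char.ofNat 96] <:+: cs := by
  constructor
  · rintro ⟨a, b, hab⟩
    have h : List.map PySem.Chars.lowerChar cs = (a ++ [Char.ofNat 96, Char.ofNat 96, Char.ofNat 96]) ++ b := by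
      rw [← hab]
    rw [List.map_eq_append_iff] at h
    obtain ⟨l1, l2, hcs, hl1, _⟩ := h
    rw [List.map_eq_append_iff] at hl1
    obtain ⟨m1, m2, hl1e, _, hm2⟩ := hl1
    have hlen : m2.length = 3 := by
      have := congrArg List.length hm2
      simpa using this
    obtain ⟨x, y, z, rfl⟩ := List.length_eq_three.mp hlen
    simp only [List.map_cons, List.map_nil, List.cons.injEq, and_true] at hm2
    obtain ⟨hx, hy, hz⟩ := hm2
    have hx' := pv_lowerChar_backtick hx
    have hy' := pv_lowerChar_backtick hy
    have hz' := pv_lowerChar_backtick hz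
    subst hx'; subst hy'; subst hz'
    exact ⟨m1, l2, by rw [hcs, hl1e, List.append_assoc]⟩
  · intro h
    have := List.IsInfix.map PySem.Chars.lowerChar h
    simpa using this

theorem pv_backtick_infix_dropWhile (cs : List Char) :
    ([Char.ofNat 96, Char.ofNat 96, Char.ofNat 96] <:+: cs.dropWhile PySem.Chars.isspace) ↔
      [Char.ofNat 96, Char.ofNat 96, Char.ofNat 96] <:+: cs := by
  constructor
  · intro h
    exact h.trans (List.dropWhile_suffix _).isInfix
  · intro h
    induction cs with
    | nil => simpa using h
    | cons c cs ih =>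
      rw [List.dropWhile_cons]
      split
      · rename_i hc
        rcases List.infix_cons_iff.mp h with hpre | hinf
        · exfalso
          obtain ⟨r, hr⟩ := hpre
          have hc96 : c = Char.ofNat 96 := by
            simpa using (congrArg (fun l => l.head?) hr).symm
          rw [hc96] at hc
          exact absurd hc (by decide)
        · exact ih hinf
      · exact h

theorem pv_backtick_infix_reverse (cs : List Char) :
    ([Char.ofNat 96, Char.ofNat 96, Char.ofNat 96] <:+: cs.reverse) ↔
      [Char.ofNat 96, Char.ofNat 96, Char.ofNat 96] <:+: cs := by
  have h := List.reverse_infix (l₁ := [Char.ofNat 96, Char.ofNat 96, Char.ofNat 96]) (l₂ := cs)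
  have ht : ([Char.ofNat 96, Char.ofNat 96, Char.ofNat 96] : List Char).reverse
      = [Char.ofNat 96, Char.ofNat 96, Char.ofNat 96] := by decide
  rw [ht] at h
  exact h

theorem pv_backtick_infix_strip (cs : List Char) :
    ([Char.ofNat 96, Char.ofNat 96, Char.ofNat 96] <:+: PySem.Chars.strip cs) ↔
      [Char.ofNat 96, Char.ofNat 96, Char.ofNat 96] <:+: cs := by
  unfold PySem.Chars.strip PySem.Chars.rstrip PySem.Chars.lstrip
  rw [pv_backtick_infix_reverse, pv_backtick_infix_dropWhile, pv_backtick_infix_reverse,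
    pv_backtick_infix_dropWhile]

theorem pv_fence_eq (l : String) :
    PySem.Str.isIn "```" (PySem.Str.lower (PySem.Str.strip l)) = PySem.Str.isIn "```" l := by
  rw [Bool.eq_iff_iff, PySem.Str.isIn_iff_infix, PySem.Str.isIn_iff_infix]
  have ht : "```".toList = [Char.ofNat 96, Char.ofNat 96, Char.ofNat 96] := by decide
  rw [ht, PySem.Str.toList_lower, PySem.Str.toList_strip]
  unfold PySem.Chars.lower
  rw [pv_backtick_infix_map, pv_backtick_infix_strip]

theorem pvKeep_eq (l : String) :
    pvKeep l = if PySem.Str.strip l = "" then []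
      else if (pvJunk.any fun p => PySem.Str.startswith (PySem.Str.lower (PySem.Str.strip l)) p) = true then []
      else [PySem.Str.strip l] := rfl

theorem pvPart_cons (l : String) (ls cur : List String) :
    pvPart (l :: ls) cur = if PySem.Str.isIn "```" l = true
      then (cur :: (pvPart ls []).1, (pvPart ls []).2)
      else pvPart ls (cur ++ [l]) := rfl

theorem pvKept_cons (sg : List String) (sgs : List (List String)) (c : Bool) :
    pvKept (sg :: sgs) c = (if c = true then [] else sg.flatMap pvKeep) ++ pvKept sgs (!c) := rfl

theorem pvAux_cons (l : String) (ls : List String) (c : Bool) :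
    pvAux (l :: ls) c = if PySem.Str.isIn "```" l = true then pvAux ls (!c)
      else if c = true then pvAux ls c else pvKeep l ++ pvAux ls c := rfl

-- A's loop accumulates exactly pvAux
theorem pv_foldA (ls : List String) : ∀ (out : List String) (c : Bool),
    (ls.foldl (fun (acc : List String × Bool) line =>
      let s := PySem.Str.strip line
      let low := PySem.Str.lower s
      if PySem.Str.isIn "```" low then (acc.1, !acc.2)
      else if acc.2 then acc
      else if s = "" then acc
      else if pvJunk.any (fun p => PySem.Str.startswith low p) then acc
      else (acc.1 ++ [s], acc.2)) (out, c)).1 = out ++ pvAux ls c := by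
  induction ls with
  | nil => intro out c; simp [pvAux]
  | cons l ls ih =>
    intro out c
    rw [List.foldl_cons]
    show (List.foldl _ (if PySem.Str.isIn "```" (PySem.Str.lower (PySem.Str.strip l)) then ((out, c).1, !(out, c).2)
      else if (out, c).2 then (out, c)
      else if PySem.Str.strip l = "" then (out, c)
      else if pvJunk.any (fun p => PySem.Str.startswith (PySem.Str.lower (PySem.Str.strip l)) p) then (out, c)
      else ((out, c).1 ++ [PySem.Str.strip l], (out, c).2)) ls).1 = _
    rw [pv_fence_eq]
    by_cases hf : PySem.Str.isIn "```" l = true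
    · rw [if_pos hf, ih, pvAux_cons, if_pos hf]
    · rw [if_neg hf, pvAux_cons, if_neg hf]
      cases c with
      | true =>
        rw [if_pos rfl, ih, if_pos rfl]
      | false =>
        rw [if_neg (by simp)]
        by_cases he : PySem.Str.strip l = ""
        · rw [if_pos he, ih, if_neg (by simp)]
          rw [pvKeep_eq, if_pos he]
          simp
        · rw [if_neg he]
          by_cases hj : (pvJunk.any fun p => PySem.Str.startswith (PySem.Str.lower (PySem.Str.strip l)) p) = true
          · rw [if_pos hj, ih, if_neg (by simp)]
            rw [pvKeep_eq, if_neg he, if_pos hj]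
            simp
          · rw [if_neg hj, ih, if_neg (by simp)]
            rw [pvKeep_eq, if_neg he, if_neg hj]
            simp [List.append_assoc]

-- B's partition loop accumulates exactly pvPart
theorem pv_foldPart (ls : List String) : ∀ (segs : List (List String)) (cur : List String),
    ls.foldl (fun (acc : List (List String) × List String) line =>
      if PySem.Str.isIn "```" line then (acc.1 ++ [acc.2], ([] : List String))
      else (acc.1, acc.2 ++ [line])) (segs, cur)
      = (segs ++ (pvPart ls cur).1, (pvPart ls cur).2) := by
  induction ls with
  | nil => intro segs cur; simp [pvPart]
  | cons l ls ih =>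
    intro segs cur
    rw [List.foldl_cons]
    by_cases hf : PySem.Str.isIn "```" l = true
    · rw [if_pos hf, ih, pvPart_cons, if_pos hf]
      simp
    · rw [if_neg hf, ih, pvPart_cons, if_neg hf]

-- B's inner per-segment loop appends the flatMap of pvKeep
theorem pv_foldInner (sg : List String) : ∀ (acc : List String),
    sg.foldl (fun (acc2 : List String) line =>
      let s := PySem.Str.strip line
      if (s != "") && !(pvJunk.any (fun pre => PySem.Str.startswith (PySem.Str.lower s) pre))
      then acc2 ++ [s] else acc2) acc = acc ++ sg.flatMap pvKeep := by
  induction sg with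
  | nil => intro acc; simp
  | cons l sg ih =>
    intro acc
    rw [List.foldl_cons]
    show List.foldl _ (if (PySem.Str.strip l != "") && !(pvJunk.any
      (fun pre => PySem.Str.startswith (PySem.Str.lower (PySem.Str.strip l)) pre))
      then acc ++ [PySem.Str.strip l] else acc) sg = _
    by_cases he : PySem.Str.strip l = ""
    · rw [if_neg (by simp [he]), ih]
      rw [List.flatMap_cons, pvKeep_eq, if_pos he]
      simp
    · by_cases hj : (pvJunk.any fun p => PySem.Str.startswith (PySem.Str.lower (PySem.Str.strip l)) p) = true
      · rw [if_neg (by simp only [hj, Bool.not_true, Bool.and_false]; exact Bool.false_ne_true), ih]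
        rw [List.flatMap_cons, pvKeep_eq, if_neg he, if_pos hj]
        simp
      · have hj' : (pvJunk.any fun p => PySem.Str.startswith (PySem.Str.lower (PySem.Str.strip l)) p) = false :=
          Bool.eq_false_iff.mpr hj
        have he' : (PySem.Str.strip l != "") = true := by simpa using he
        rw [if_pos (by rw [Bool.and_eq_true]; exact ⟨he', by rw [hj']; rfl⟩), ih]
        rw [List.flatMap_cons, pvKeep_eq, if_neg he, if_neg hj]
        simp [List.append_assoc]

theorem pv_mod_two (n : Int) : PySem.Int.mod n 2 = n % 2 := by
  show Int.fmod n 2 = n % 2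
  rw [Int.fmod_eq_emod]
  norm_num

-- B's outer loop over the enumerated segments accumulates pvKept
theorem pv_foldEnum (sgs : List (List String)) : ∀ (n : Int) (acc : List String),
    (PySem.List.enumerate sgs n).foldl (fun (acc : List String) p =>
      if PySem.Int.mod p.1 2 == 0 then
        p.2.foldl (fun (acc2 : List String) line =>
          let s := PySem.Str.strip line
          if (s != "") && !(pvJunk.any (fun pre => PySem.Str.startswith (PySem.Str.lower s) pre))
          then acc2 ++ [s] else acc2) acc
      else acc) acc = acc ++ pvKept sgs (n % 2 != 0) := by
  induction sgs with
  | nil => intro n acc; simp [PySem.List.enumerate, pvKept]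
  | cons sg sgs ih =>
    intro n acc
    have hcons : PySem.List.enumerate (sg :: sgs) n = (n, sg) :: PySem.List.enumerate sgs (n + 1) := rfl
    rw [hcons, List.foldl_cons]
    have hflip : (((n + 1) % 2 : Int) != 0) = !((n % 2 : Int) != 0) := by
      have h0 := Int.emod_two_eq_zero_or_one n
      have h1 := Int.emod_two_eq_zero_or_one (n + 1)
      rcases h0 with h0 | h0 <;> rcases h1 with h1 | h1 <;> simp [h0, h1] <;> omega
    by_cases hm : (n % 2 : Int) = 0
    · rw [if_pos (by simp [pv_mod_two, hm]), pv_foldInner, ih, hflip]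
      rw [pvKept_cons, if_neg (by simp [hm])]
      simp [List.append_assoc, hm]
    · rw [if_neg (by simp [pv_mod_two, hm]), ih, hflip]
      rw [pvKept_cons, if_pos (by simpa using hm)]
      simp [hm]

-- the heart of the equivalence: B's kept-even-segments equal A's flag-filtered lines
theorem pv_main (ls : List String) : ∀ (cur : List String) (c : Bool),
    pvKept ((pvPart ls cur).1 ++ [(pvPart ls cur).2]) c
      = (if c then [] else cur.flatMap pvKeep) ++ pvAux ls c := by
  induction ls with
  | nil =>
    intro cur c
    simp [pvPart, pvKept, pvAux]
  | cons l ls ih =>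
    intro cur c
    by_cases hf : PySem.Str.isIn "```" l = true
    · have hp : pvPart (l :: ls) cur = (cur :: (pvPart ls []).1, (pvPart ls []).2) := by
        rw [pvPart_cons, if_pos hf]
      rw [hp]
      show pvKept (cur :: ((pvPart ls []).1 ++ [(pvPart ls []).2])) c = _
      rw [pvKept_cons, ih [] (!c), pvAux_cons, if_pos hf]
      simp
    · have hp : pvPart (l :: ls) cur = pvPart ls (cur ++ [l]) := by
        rw [pvPart_cons, if_neg hf]
      rw [hp, ih (cur ++ [l]) c, pvAux_cons, if_neg hf]
      cases c with
      | true => rw [if_pos rfl, if_pos rfl, if_pos rfl]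
      | false =>
        rw [if_neg (by simp), if_neg (by simp), if_neg (by simp)]
        simp [List.flatMap_append, List.append_assoc]

-- ===== VERDICT (by name: the statement is the Claim_ definition above) =====
theorem strip_junk_py_spec : Claim_equal_strip_junk_py := by
  intro text _
  unfold Spec_strip_junk_py strip_junk_py strip_junk_py_alt
  simp only [pv_foldA, pv_foldPart, pv_foldEnum, List.nil_append]
  have h0 : (((0 : Int) % 2) != 0) = false := by decide
  rw [h0]
  have hm := pv_main ((PySem.Str.split? text "\n").getD []) [] false
  simp only [Bool.false_eq_true, ite_false, List.flatMap_nil, List.nil_append] at hm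
  rw [hm]
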